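-- pv_equiv track=rewrite | github.com/riturajkaushik/self-learning-tic-tac-toe | tic_tac_toe.py | forward_transform_action
-- ===== SOURCE A (Python) =====
-- def forward_transform_action(action, rotate_right, flip):
--
--     if flip == 1:
--         if action == 0:
--             action = 2
--         elif action == 3:
--             action = 5
--         elif action == 6:
--             action = 8
--         elif action == 2:
--             action = 0
--         elif action == 5:
--             action = 3
--         elif action == 8:
--             action = 6
--
--     while rotate_right > 0:
--         rotate_right = rotate_right - 1
--         if action == 1:
--             action = 5
--         elif action == 5:
--             action = 7
--         elif action == 7:
--             action = 3
--         elif action == 3: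
--             action = 1
--         elif action == 0:
--             action = 2
--         elif action == 2:
--             action = 8
--         elif action == 8:
--             action = 6
--         elif action == 6:
--             action = 0
--
--     return action
-- ===== SOURCE B (Python) =====
-- # O(1) re-implementation: flip table + precomputed rotation-power tables, rotate_right % 4.
-- _FLIP = {0: 2, 3: 5, 6: 8, 2: 0, 5: 3, 8: 6}
-- _ROT_POW = (
--     {},  # rotating 0 times leaves every action unchanged
--     {1: 5, 5: 7, 7: 3, 3: 1, 0: 2, 2: 8, 8: 6, 6: 0},
--     {1: 7, 5: 3, 7: 1, 3: 5, 0: 8, 2: 6, 8: 0, 6: 2},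
--     {1: 3, 5: 1, 7: 5, 3: 7, 0: 6, 2: 0, 8: 2, 6: 8},
-- )
--
-- def forward_transform_action(action, rotate_right, flip):
--     if flip == 1:
--         action = _FLIP.get(action, action)
--     if rotate_right > 0:
--         action = _ROT_POW[rotate_right % 4].get(action, action)
--     return action
-- ===== Notes on version B (the rewrite author's own statement) =====
-- stated objective: faster
-- what changed: Replaced the O(rotate_right) rotation while-loop by an O(1) lookup in precomputed rotation-power tables indexed by rotate_right % 4 (and a flip table instead of the if-chain).
import Mathlib
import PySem

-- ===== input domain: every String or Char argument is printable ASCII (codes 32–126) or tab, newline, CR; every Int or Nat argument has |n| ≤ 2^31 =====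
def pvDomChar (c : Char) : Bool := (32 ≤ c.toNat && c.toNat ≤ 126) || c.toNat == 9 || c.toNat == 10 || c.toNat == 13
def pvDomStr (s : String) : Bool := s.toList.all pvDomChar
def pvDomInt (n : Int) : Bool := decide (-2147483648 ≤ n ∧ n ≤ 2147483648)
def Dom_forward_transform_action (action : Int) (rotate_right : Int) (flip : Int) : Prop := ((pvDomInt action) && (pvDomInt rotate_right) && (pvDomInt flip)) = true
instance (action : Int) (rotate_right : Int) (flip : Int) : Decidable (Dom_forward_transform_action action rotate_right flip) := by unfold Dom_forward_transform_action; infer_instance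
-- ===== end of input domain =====

-- B replaces A's O(rotate_right) rotation while-loop by an O(1) lookup in precomputed
-- rotation-power tables indexed by rotate_right % 4 (objective: faster).

-- ===== PORT A =====
-- one iteration of A's while-loop body (the if/elif rotation chain)
def pvRotStep (action : Int) : Int :=
  if action == 1 then 5
  else if action == 5 then 7
  else if action == 7 then 3
  else if action == 3 then 1
  else if action == 0 then 2
  else if action == 2 then 8
  else if action == 8 then 6
  else if action == 6 then 0
  else action

-- A's 'while rotate_right > 0' loop
def pvRotLoop (action : Int) (rotate_right : Int) : Int :=
  if rotate_right > 0 then pvRotLoop (pvRotStep action) (rotate_right - 1) else action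
termination_by rotate_right.toNat
decreasing_by omega

def forward_transform_action (action : Int) (rotate_right : Int) (flip : Int) : Int :=
  let action :=
    if flip == 1 then
      if action == 0 then 2
      else if action == 3 then 5
      else if action == 6 then 8
      else if action == 2 then 0
      else if action == 5 then 3
      else if action == 8 then 6
      else action
    else action
  pvRotLoop action rotate_right

-- ===== PORT B =====
def pvFlipD : PySem.Dict Int Int := PySem.Dict.ofList [(0,2),(3,5),(6,8),(2,0),(5,3),(8,6)]
def pvRotPow : List (PySem.Dict Int Int) :=
  [PySem.Dict.ofList [],
   PySem.Dict.ofList [(1,5),(5,7),(7,3),(3,1),(0,2),(2,8),(8,6),(6,0)],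
   PySem.Dict.ofList [(1,7),(5,3),(7,1),(3,5),(0,8),(2,6),(8,0),(6,2)],
   PySem.Dict.ofList [(1,3),(5,1),(7,5),(3,7),(0,6),(2,0),(8,2),(6,8)]]

def forward_transform_action_alt (action : Int) (rotate_right : Int) (flip : Int) : Int :=
  let action := if flip == 1 then pvFlipD.getD action action else action
  if rotate_right > 0 then
    -- tuple index _ROT_POW[rotate_right % 4]; 0 ≤ rotate_right % 4 < 4, always in range
    (PySem.List.pyGetD pvRotPow (PySem.Int.mod rotate_right 4) (PySem.Dict.ofList [])).getD action action
  else action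

-- ===== PRECONDITION & SPEC =====
def Spec_forward_transform_action (action : Int) (rotate_right : Int) (flip : Int) (out : Int) : Prop := out = forward_transform_action_alt action rotate_right flip
instance (action : Int) (rotate_right : Int) (flip : Int) (out : Int) : Decidable (Spec_forward_transform_action action rotate_right flip out) := by unfold Spec_forward_transform_action; infer_instance

-- ===== CLAIM (what is proved, stated in full; the proofs are below) =====
def Claim_equal_forward_transform_action : Prop := ∀ (action : Int) (rotate_right : Int) (flip : Int), Dom_forward_transform_action action rotate_right flip → Spec_forward_transform_action action rotate_right flip (forward_transform_action action rotate_right flip)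

-- ===== LEMMAS AND PROOFS =====

lemma pvRotStep_id (a : Int) (h : ¬(a=0∨a=1∨a=2∨a=3∨a=5∨a=6∨a=7∨a=8)) : pvRotStep a = a := by
  simp only [pvRotStep, beq_iff_eq]; split_ifs <;> omega

lemma pvRotStep_four (a : Int) : pvRotStep (pvRotStep (pvRotStep (pvRotStep a))) = a := by
  by_cases h : a=0∨a=1∨a=2∨a=3∨a=5∨a=6∨a=7∨a=8
  · rcases h with rfl|rfl|rfl|rfl|rfl|rfl|rfl|rfl <;> rfl
  · rw [pvRotStep_id a h, pvRotStep_id a h, pvRotStep_id a h, pvRotStep_id a h]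

lemma pvRotLoop_unfold (a r : Int) :
    pvRotLoop a r = if r > 0 then pvRotLoop (pvRotStep a) (r - 1) else a := by
  rw [pvRotLoop]

lemma pvRotLoop_zero (a : Int) : pvRotLoop a 0 = a := by
  rw [pvRotLoop_unfold]; norm_num

lemma pvRotLoop_sub4 (a r : Int) (h : 4 ≤ r) : pvRotLoop a r = pvRotLoop a (r - 4) := by
  rw [pvRotLoop_unfold, if_pos (by omega), pvRotLoop_unfold, if_pos (by omega),
      pvRotLoop_unfold, if_pos (by omega), pvRotLoop_unfold, if_pos (by omega),
      pvRotStep_four]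
  congr 1
  omega

lemma pvRotLoop_mod (a r : Int) (h : 0 ≤ r) : pvRotLoop a r = pvRotLoop a (r % 4) := by
  by_cases h4 : 4 ≤ r
  · rw [pvRotLoop_sub4 a r h4, pvRotLoop_mod a (r - 4) (by omega)]
    congr 1
    omega
  · rw [Int.emod_eq_of_lt h (by omega)]
termination_by r.toNat
decreasing_by omega

lemma pvFlipD_mk : pvFlipD = PySem.Dict.mk [(0,2),(3,5),(6,8),(2,0),(5,3),(8,6)] := by decide

lemma pvFlip_eq (a : Int) :
    (if a == 0 then (2:Int) else if a == 3 then 5 else if a == 6 then 8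
     else if a == 2 then 0 else if a == 5 then 3 else if a == 8 then 6 else a)
    = pvFlipD.getD a a := by
  rw [pvFlipD_mk]
  by_cases h : a=0∨a=2∨a=3∨a=5∨a=6∨a=8
  · rcases h with rfl|rfl|rfl|rfl|rfl|rfl <;> rfl
  · push Not at h
    obtain ⟨h0,h2,h3,h5,h6,h8⟩ := h
    simp only [PySem.Dict.getD, PySem.Dict.get?_mk_cons, beq_iff_eq]
    simp [PySem.Dict.get?, h0, h2, h3, h5, h6, h8,
          Ne.symm h0, Ne.symm h2, Ne.symm h3, Ne.symm h5, Ne.symm h6, Ne.symm h8]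

lemma pvRot_one (a : Int) :
    pvRotLoop a 1
      = (PySem.Dict.mk [((1:Int),(5:Int)),(5,7),(7,3),(3,1),(0,2),(2,8),(8,6),(6,0)]).getD a a := by
  rw [pvRotLoop_unfold, if_pos (by omega)]
  norm_num [pvRotLoop_zero]
  by_cases h : a=0∨a=1∨a=2∨a=3∨a=5∨a=6∨a=7∨a=8
  · rcases h with rfl|rfl|rfl|rfl|rfl|rfl|rfl|rfl <;> rfl
  · rw [pvRotStep_id a h]
    push Not at h
    obtain ⟨h0,h1,h2,h3,h5,h6,h7,h8⟩ := h
    simp only [PySem.Dict.getD, PySem.Dict.get?_mk_cons, beq_iff_eq]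
    simp [PySem.Dict.get?, Ne.symm h0, Ne.symm h1, Ne.symm h2, Ne.symm h3,
          Ne.symm h5, Ne.symm h6, Ne.symm h7, Ne.symm h8]

lemma pvRot_two (a : Int) :
    pvRotLoop a 2
      = (PySem.Dict.mk [((1:Int),(7:Int)),(5,3),(7,1),(3,5),(0,8),(2,6),(8,0),(6,2)]).getD a a := by
  rw [pvRotLoop_unfold, if_pos (by omega)]
  norm_num
  rw [pvRotLoop_unfold, if_pos (by omega)]
  norm_num [pvRotLoop_zero]
  by_cases h : a=0∨a=1∨a=2∨a=3∨a=5∨a=6∨a=7∨a=8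
  · rcases h with rfl|rfl|rfl|rfl|rfl|rfl|rfl|rfl <;> rfl
  · rw [pvRotStep_id a h, pvRotStep_id a h]
    push Not at h
    obtain ⟨h0,h1,h2,h3,h5,h6,h7,h8⟩ := h
    simp only [PySem.Dict.getD, PySem.Dict.get?_mk_cons, beq_iff_eq]
    simp [PySem.Dict.get?, Ne.symm h0, Ne.symm h1, Ne.symm h2, Ne.symm h3,
          Ne.symm h5, Ne.symm h6, Ne.symm h7, Ne.symm h8]

lemma pvRot_three (a : Int) :
    pvRotLoop a 3
      = (PySem.Dict.mk [((1:Int),(3:Int)),(5,1),(7,5),(3,7),(0,6),(2,0),(8,2),(6,8)]).getD a a := by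
  rw [pvRotLoop_unfold, if_pos (by omega)]
  norm_num
  rw [pvRotLoop_unfold, if_pos (by omega)]
  norm_num
  rw [pvRotLoop_unfold, if_pos (by omega)]
  norm_num [pvRotLoop_zero]
  by_cases h : a=0∨a=1∨a=2∨a=3∨a=5∨a=6∨a=7∨a=8
  · rcases h with rfl|rfl|rfl|rfl|rfl|rfl|rfl|rfl <;> rfl
  · rw [pvRotStep_id a h, pvRotStep_id a h, pvRotStep_id a h]
    push Not at h
    obtain ⟨h0,h1,h2,h3,h5,h6,h7,h8⟩ := h
    simp only [PySem.Dict.getD, PySem.Dict.get?_mk_cons, beq_iff_eq]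
    simp [PySem.Dict.get?, Ne.symm h0, Ne.symm h1, Ne.symm h2, Ne.symm h3,
          Ne.symm h5, Ne.symm h6, Ne.symm h7, Ne.symm h8]

lemma pvRotPow_get0 : PySem.List.pyGetD pvRotPow 0 (PySem.Dict.ofList []) = PySem.Dict.mk [] := by decide
lemma pvRotPow_get1 : PySem.List.pyGetD pvRotPow 1 (PySem.Dict.ofList [])
    = PySem.Dict.mk [((1:Int),(5:Int)),(5,7),(7,3),(3,1),(0,2),(2,8),(8,6),(6,0)] := by decide
lemma pvRotPow_get2 : PySem.List.pyGetD pvRotPow 2 (PySem.Dict.ofList [])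
    = PySem.Dict.mk [((1:Int),(7:Int)),(5,3),(7,1),(3,5),(0,8),(2,6),(8,0),(6,2)] := by decide
lemma pvRotPow_get3 : PySem.List.pyGetD pvRotPow 3 (PySem.Dict.ofList [])
    = PySem.Dict.mk [((1:Int),(3:Int)),(5,1),(7,5),(3,7),(0,6),(2,0),(8,2),(6,8)] := by decide

lemma pvStage_eq (a r : Int) :
    pvRotLoop a r =
      (if r > 0 then
        (PySem.List.pyGetD pvRotPow (PySem.Int.mod r 4) (PySem.Dict.ofList [])).getD a a
      else a) := by
  by_cases hr : r > 0
  · rw [if_pos hr, pvRotLoop_mod a r (by omega), PySem.Int.mod_eq_emod_of_pos (by omega)]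
    have h4 : r % 4 = 0 ∨ r % 4 = 1 ∨ r % 4 = 2 ∨ r % 4 = 3 := by omega
    rcases h4 with h | h | h | h <;> rw [h]
    · rw [pvRotLoop_zero, pvRotPow_get0]
      simp [PySem.Dict.getD, PySem.Dict.get?]
    · rw [pvRot_one, pvRotPow_get1]
    · rw [pvRot_two, pvRotPow_get2]
    · rw [pvRot_three, pvRotPow_get3]
  · rw [if_neg hr, pvRotLoop_unfold, if_neg hr]

-- ===== VERDICT (by name: the statement is the Claim_ definition above) =====
theorem forward_transform_action_spec : Claim_equal_forward_transform_action := by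
  intro action rotate_right flip _
  unfold Spec_forward_transform_action forward_transform_action forward_transform_action_alt
  rw [pvStage_eq]
  by_cases hf : flip == 1
  · simp only [if_pos hf, pvFlip_eq]
  · simp only [if_neg hf]
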